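-- pv_equiv track=rewrite | github.com/joren485/Sudokuplotter | algx (Sudoku Solver)/algXv.3/algorithmxv3.0.py | settomatrix
-- ===== SOURCE A (Python) =====
-- def settomatrix(Set):
-- 	values = []
-- 	matrix= {}
-- 	keys = sorted(list(Set.keys()))
-- 	for i in keys:
-- 		for j in Set[i]:
-- 			if j not in values:
-- 				values.append(j)
--
-- 	for i in range(len(keys)):
-- 		key = keys[i]
-- 		matrix[key]=[]
-- 		for j in values:
-- 			if j in Set[key]:
-- 				matrix[key].append(1)
-- 			else:
-- 				matrix[key].append(0)
-- 	return matrix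
-- ===== SOURCE B (Python) =====
-- def settomatrix(Set):
--     keys = sorted(Set.keys())
--     values = []
--     seen = set()
--     for k in keys:
--         for v in Set[k]:
--             if v not in seen:
--                 seen.add(v)
--                 values.append(v)
--     index = {v: i for i, v in enumerate(values)}
--     matrix = {}
--     for k in keys:
--         row = [0] * len(values)
--         for e in Set[k]:
--             row[index[e]] = 1
--         matrix[k] = row
--     return matrix
-- ===== Notes on version B (the rewrite author's own statement) =====
-- stated objective: faster
-- what changed: Replaces A's per-key scan over all columns with membership tests by a seen-set dedup pass plus a value-to-column index dict and an index-scatter over each key's own elements into a preallocated zero row.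
import Mathlib
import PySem

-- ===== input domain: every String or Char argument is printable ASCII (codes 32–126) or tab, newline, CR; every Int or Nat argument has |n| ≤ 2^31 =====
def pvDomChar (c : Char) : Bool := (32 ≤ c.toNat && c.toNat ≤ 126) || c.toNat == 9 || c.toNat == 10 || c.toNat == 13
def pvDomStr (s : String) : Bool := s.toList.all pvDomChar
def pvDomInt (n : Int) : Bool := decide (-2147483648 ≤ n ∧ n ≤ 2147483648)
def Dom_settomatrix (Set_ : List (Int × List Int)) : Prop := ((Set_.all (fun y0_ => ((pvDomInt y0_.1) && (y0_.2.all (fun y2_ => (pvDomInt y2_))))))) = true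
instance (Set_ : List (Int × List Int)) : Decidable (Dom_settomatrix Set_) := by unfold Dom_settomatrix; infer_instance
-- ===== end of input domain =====

-- B replaces A's per-key scan over all columns (a linear `j in values` test per cell) by a
-- seen-set dedup pass plus a value→column index dict and an index-scatter into a zero row.

-- ===== PORT A =====
def settomatrix (Set_ : List (Int × List Int)) : List (Int × List Int) :=
  let d : PySem.Dict Int (List Int) := PySem.Dict.mk Set_
  let keys := PySem.List.sorted d.keys (fun x => x) false
  let values := keys.foldl (fun values i =>
      (d.getD i []).foldl (fun values j =>
        if values.contains j then values else values ++ [j]) values) []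
  let matrix := keys.foldl (fun (m : PySem.Dict Int (List Int)) key =>
      m.insert key (values.foldl (fun row j =>
        if (d.getD key []).contains j then row ++ [(1 : Int)] else row ++ [(0 : Int)]) []))
    PySem.Dict.empty
  matrix.items

-- ===== PORT B =====
def settomatrix_alt (Set_ : List (Int × List Int)) : List (Int × List Int) :=
  let d : PySem.Dict Int (List Int) := PySem.Dict.mk Set_
  let keys := PySem.List.sorted d.keys (fun x => x) false
  let p := keys.foldl (fun (p : List Int × PySem.Set Int) k =>
      (d.getD k []).foldl (fun (p : List Int × PySem.Set Int) v =>
        if PySem.Set.contains p.2 v then p else (p.1 ++ [v], PySem.Set.add p.2 v)) p)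
    ([], PySem.Set.empty)
  let values := p.1
  let index : PySem.Dict Int Int := (PySem.List.enumerate values).foldl
      (fun idx iv => idx.insert iv.2 iv.1) PySem.Dict.empty
  keys.map (fun k =>
    (k, (d.getD k []).foldl
          (fun row e => PySem.List.pySetD row (index.getD e 0) 1)
          (List.replicate values.length 0)))

-- ===== PRECONDITION & SPEC =====
-- Pre_ restricts to association lists with distinct keys: the argument stands for a Python dict,
-- which cannot carry duplicate keys, so no excluded input corresponds to a run of A.
def Pre_settomatrix (Set_ : List (Int × List Int)) : Prop := (Set_.map Prod.fst).Nodup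
instance (Set_ : List (Int × List Int)) : Decidable (Pre_settomatrix Set_) := by
  unfold Pre_settomatrix; infer_instance
def pvWitness_settomatrix : (List (Int × List Int)) := [(2, [5, 3]), (1, [3, 4])]

def Spec_settomatrix (Set_ : List (Int × List Int)) (out : List (Int × List Int)) : Prop :=
  out = settomatrix_alt Set_
instance (Set_ : List (Int × List Int)) (out : List (Int × List Int)) :
    Decidable (Spec_settomatrix Set_ out) := by unfold Spec_settomatrix; infer_instance

-- ===== CLAIM (what is proved, stated in full; the proofs are below) =====
def Claim_equal_settomatrix : Prop := ∀ (Set_ : List (Int × List Int)),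
  Dom_settomatrix Set_ → Pre_settomatrix Set_ → Spec_settomatrix Set_ (settomatrix Set_)

-- ===== LEMMAS AND PROOFS =====

-- A's dedup-append step is PySem.Set.add
lemma stepA_eq_add : (fun (vs : List Int) (j : Int) =>
    if vs.contains j then vs else vs ++ [j]) = PySem.Set.add := by
  funext vs j; simp [PySem.Set.add, PySem.Set.contains]

-- a nested fold over per-key lists is a fold over the flattened list
lemma foldl_foldl_flatMap {α β : Type} (f : List β → β → List β) (g : α → List β) :
    ∀ (ks : List α) (acc : List β),
      ks.foldl (fun v k => (g k).foldl f v) acc = (ks.flatMap g).foldl f acc := by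
  intro ks
  induction ks with
  | nil => intro acc; simp
  | cons k ks ih => intro acc; simp [List.foldl_append, ih]

-- B's paired (values, seen) fold keeps both components equal to the single Set.add fold
lemma pairfold_inner (js : List Int) :
    ∀ (x : List Int),
      js.foldl (fun (p : List Int × PySem.Set Int) v =>
        if PySem.Set.contains p.2 v then p else (p.1 ++ [v], PySem.Set.add p.2 v)) (x, x)
      = (js.foldl PySem.Set.add x, js.foldl PySem.Set.add x) := by
  induction js with
  | nil => intro x; rfl
  | cons j js ih =>
    intro x
    by_cases h : j ∈ x
    · simpa [PySem.Set.contains, PySem.Set.add, h] using ih x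
    · simpa [PySem.Set.contains, PySem.Set.add, h] using ih (x ++ [j])

lemma pairfold_outer (g : Int → List Int) (ks : List Int) :
    ∀ (x : List Int),
      ks.foldl (fun (p : List Int × PySem.Set Int) k =>
        (g k).foldl (fun (p : List Int × PySem.Set Int) v =>
          if PySem.Set.contains p.2 v then p else (p.1 ++ [v], PySem.Set.add p.2 v)) p) (x, x)
      = (ks.foldl (fun v k => (g k).foldl PySem.Set.add v) x,
         ks.foldl (fun v k => (g k).foldl PySem.Set.add v) x) := by
  induction ks with
  | nil => intro x; rfl
  | cons k ks ih =>
    intro x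
    simp only [List.foldl_cons]
    rw [pairfold_inner, ih]

-- value of the index dictionary built by folding insert over enumerate
lemma getD_indexfold (l : List Int) (hl : l.Nodup) :
    ∀ (s : Int) (acc : PySem.Dict Int Int) (v d0 : Int),
      ((PySem.List.enumerate l s).foldl (fun idx iv => idx.insert iv.2 iv.1) acc).getD v d0
      = if v ∈ l then s + (l.idxOf v : Int) else acc.getD v d0 := by
  induction l with
  | nil => intro s acc v d0; simp [PySem.List.enumerate_nil]
  | cons x xs ih =>
    intro s acc v d0
    have hx : x ∉ xs := (List.nodup_cons.mp hl).1
    have hxs : xs.Nodup := (List.nodup_cons.mp hl).2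
    rw [PySem.List.enumerate_cons]
    simp only [List.foldl_cons]
    rw [ih hxs]
    by_cases hv : v ∈ xs
    · have hne : x ≠ v := fun h => hx (h ▸ hv)
      have hm : v ∈ x :: xs := List.mem_cons_of_mem _ hv
      simp only [hv, if_pos, hm, List.idxOf_cons,
        (by simp [hne] : (x == v) = false), Bool.cond_false]
      push_cast; ring
    · simp only [hv, if_neg, not_false_iff]
      rw [PySem.Dict.getD_insert]
      by_cases hvx : v = x
      · subst hvx
        simp
      · have hm : v ∉ x :: xs := by simp [hvx, hv]
        simp [hvx, hm]

-- setting position idxOf e of a map over a nodup list flips exactly the e entry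
lemma set_map_idxOf (V : List Int) (hnd : V.Nodup) (g : Int → Int) (e : Int) (he : e ∈ V) :
    (V.map g).set (V.idxOf e) 1 = V.map (fun j => if j = e then 1 else g j) := by
  induction V with
  | nil => cases he
  | cons v vs ih =>
    have hv : v ∉ vs := (List.nodup_cons.mp hnd).1
    have hvs : vs.Nodup := (List.nodup_cons.mp hnd).2
    by_cases hve : v = e
    · subst hve
      have hcg : ∀ j ∈ vs, (fun j => if j = v then (1 : Int) else g j) j = g j := by
        intro j hj
        have : j ≠ v := fun h => hv (h ▸ hj)
        simp [this]
      simp [List.map_congr_left hcg]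
    · have he' : e ∈ vs := by
        rcases List.mem_cons.mp he with h | h
        · exact absurd h.symm hve
        · exact h
      simp only [List.map_cons, List.idxOf_cons,
        (by simp [hve] : (v == e) = false), Bool.cond_false, List.set_cons_succ]
      rw [ih hvs he']
      simp [hve]

-- the scatter loop over S turns a map over V into the membership-indicator override
lemma scatter_eq (V : List Int) (hnd : V.Nodup) (S : List Int) (hS : ∀ e ∈ S, e ∈ V) :
    ∀ (g : Int → Int),
      S.foldl (fun r e => r.set (V.idxOf e) 1) (V.map g)
      = V.map (fun j => if j ∈ S then 1 else g j) := by
  induction S with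
  | nil => intro g; simp
  | cons e S ih =>
    intro g
    have heV : e ∈ V := hS e (List.mem_cons_self)
    have hS' : ∀ x ∈ S, x ∈ V := fun x hx => hS x (List.mem_cons_of_mem _ hx)
    simp only [List.foldl_cons]
    rw [set_map_idxOf V hnd g e heV, ih hS']
    apply List.map_congr_left
    intro j _
    by_cases h1 : j ∈ S
    · simp [h1, List.mem_cons]
    · by_cases h2 : j = e <;> simp [h1, h2, List.mem_cons]

-- ===== VERDICT (by name: the statement is the Claim_ definition above) =====
theorem settomatrix_spec : Claim_equal_settomatrix := by
  intro Set_ _hdom hpre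
  unfold Spec_settomatrix
  simp only [settomatrix, settomatrix_alt]
  rw [stepA_eq_add]
  rw [show (PySem.Set.empty : PySem.Set Int) = ([] : List Int) from rfl]
  rw [pairfold_outer (fun k => (PySem.Dict.mk Set_).getD k []) _ []]
  rw [foldl_foldl_flatMap PySem.Set.add (fun k => (PySem.Dict.mk Set_).getD k [])]
  rw [← PySem.Set.ofList_eq_foldl]
  set keys := PySem.List.sorted (PySem.Dict.mk Set_).keys (fun x => x) false with hkeys
  set g : Int → List Int := fun k => (PySem.Dict.mk Set_).getD k [] with hg
  set V : List Int := PySem.Set.ofList (keys.flatMap g) with hV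
  have hknd : keys.Nodup := by
    apply (PySem.List.sorted_perm (PySem.Dict.mk Set_).keys (fun x => x) false).symm.nodup
    simpa [PySem.Dict.keys_mk] using hpre
  have hVnd : V.Nodup := PySem.Set.nodup_ofList _
  rw [PySem.Dict.items_foldl_insert_fresh keys (fun k => k)
      (fun key => V.foldl (fun row j =>
        if (g key).contains j then row ++ [(1 : Int)] else row ++ [(0 : Int)]) [])
      PySem.Dict.empty (fun a _ => PySem.Dict.contains_empty a)
      (by simpa using hknd)]
  rw [show (PySem.Dict.empty : PySem.Dict Int (List Int)).items = [] from rfl]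
  rw [List.nil_append]
  apply List.map_congr_left
  intro k hk
  have hmemV : ∀ e ∈ g k, e ∈ V := by
    intro e he
    rw [hV, PySem.Set.mem_ofList]
    exact List.mem_flatMap.mpr ⟨k, hk, he⟩
  refine Prod.ext rfl ?_
  show V.foldl (fun row j => if (g k).contains j then row ++ [(1:Int)] else row ++ [0]) []
      = (g k).foldl (fun row e => PySem.List.pySetD row
          (((PySem.List.enumerate V).foldl (fun idx iv => idx.insert iv.2 iv.1)
            PySem.Dict.empty).getD e 0) 1) (List.replicate V.length 0)
  rw [PySem.List.foldl_congr_mem V _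
      (fun row j => row ++ [if (g k).contains j then (1:Int) else 0]) []
      (by intro acc x _; by_cases h : x ∈ g k <;> simp [h])]
  rw [PySem.List.foldl_append_singleton_eq_map]
  rw [List.nil_append]
  rw [PySem.List.foldl_congr_mem (g k) _
      (fun row e => row.set (V.idxOf e) 1) (List.replicate V.length 0)
      (by
        intro acc e he
        rw [getD_indexfold V hVnd 0 PySem.Dict.empty e 0]
        rw [if_pos (hmemV e he), zero_add, PySem.List.pySetD_natCast])]
  rw [show List.replicate V.length (0:Int) = V.map (Function.const Int 0) from List.map_const.symm]
  rw [scatter_eq V hVnd (g k) hmemV (Function.const Int 0)]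
  apply List.map_congr_left
  intro j _
  by_cases h : j ∈ g k <;> simp [h, Function.const]
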